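-- pv_equiv track=rewrite | github.com/salesforce/jarm | jarm.py | cipher_mung
-- ===== SOURCE A (Python) =====
-- def cipher_mung(ciphers, request):
--     output = []
--     cipher_len = len(ciphers)
--     #Ciphers backward
--     if (request == "REVERSE"):
--         output = ciphers[::-1]
--     #Bottom half of ciphers
--     elif (request == "BOTTOM_HALF"):
--         if (cipher_len % 2 == 1):
--             output = ciphers[int(cipher_len/2)+1:]
--         else:
--             output = ciphers[int(cipher_len/2):]
--     #Top half of ciphers in reverse order
--     elif (request == "TOP_HALF"):
--         if (cipher_len % 2 == 1):
--             output.append(ciphers[int(cipher_len/2)])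
--             #Top half gets the middle cipher
--         output += cipher_mung(cipher_mung(ciphers, "REVERSE"),"BOTTOM_HALF")
--     #Middle-out cipher order
--     elif (request == "MIDDLE_OUT"):
--         middle = int(cipher_len/2)
--         # if ciphers are uneven, start with the center.  Second half before first half
--         if (cipher_len % 2 == 1):
--             output.append(ciphers[middle])
--             for i in range(1, middle+1):
--                 output.append(ciphers[middle + i])
--                 output.append(ciphers[middle - i])
--         else:
--             for i in range(1, middle+1):
--                 output.append(ciphers[middle-1 + i])
--                 output.append(ciphers[middle - i])
--     return output
-- ===== SOURCE B (Python) =====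
-- def cipher_mung(ciphers, request):
--     n = len(ciphers)
--     h = n // 2
--     if request == "REVERSE":
--         return ciphers[::-1]
--     if request == "BOTTOM_HALF":
--         return ciphers[h + n % 2:]
--     if request == "TOP_HALF":
--         mid = [ciphers[h]] if n % 2 else []
--         return mid + ciphers[:h][::-1]
--     if request == "MIDDLE_OUT":
--         mid = [ciphers[h]] if n % 2 else []
--         out = list(mid)
--         for r, l in zip(ciphers[h + n % 2:], ciphers[:h][::-1]):
--             out.append(r)
--             out.append(l)
--         return out
--     return []
-- ===== Notes on version B (the rewrite author's own statement) =====
-- stated objective: simpler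
-- what changed: B removes A's double recursion (TOP_HALF calling cipher_mung twice) and A's index-arithmetic loop: every branch is computed directly from slices, with BOTTOM_HALF's parity branch collapsed into one slice and MIDDLE_OUT built by zipping the right half with the reversed left half.
import Mathlib
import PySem

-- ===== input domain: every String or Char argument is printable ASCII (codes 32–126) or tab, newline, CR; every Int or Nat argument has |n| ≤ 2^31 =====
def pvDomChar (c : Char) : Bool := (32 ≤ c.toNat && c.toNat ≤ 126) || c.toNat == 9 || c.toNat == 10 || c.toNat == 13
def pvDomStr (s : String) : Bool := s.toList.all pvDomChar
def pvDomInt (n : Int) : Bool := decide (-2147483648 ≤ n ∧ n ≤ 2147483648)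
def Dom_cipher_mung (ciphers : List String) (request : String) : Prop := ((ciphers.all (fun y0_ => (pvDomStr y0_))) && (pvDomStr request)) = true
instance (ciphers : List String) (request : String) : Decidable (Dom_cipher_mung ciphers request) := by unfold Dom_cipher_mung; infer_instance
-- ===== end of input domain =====

-- B replaces A's recursive TOP_HALF and index-arithmetic MIDDLE_OUT loop with direct
-- slice/zip constructions (objective: simpler); proved equal to A on all inputs.

-- ===== PORT A =====
-- Port of A. Notes: `int(cipher_len/2)` equals `cipher_len // 2` for nonnegative lengths, ported
-- as PySem.Int.floordiv; `ciphers[::-1]` is List.reverse (exact); in-range `ciphers[i]` is pyGetD.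
def cipher_mung (ciphers : List String) (request : String) : List String :=
  let cipher_len : Int := (ciphers.length : Int)
  if request == "REVERSE" then
    ciphers.reverse
  else if request == "BOTTOM_HALF" then
    if PySem.Int.mod cipher_len 2 == 1 then
      PySem.List.slice ciphers (some (PySem.Int.floordiv cipher_len 2 + 1)) none
    else
      PySem.List.slice ciphers (some (PySem.Int.floordiv cipher_len 2)) none
  else if request == "TOP_HALF" then
    let output : List String :=
      if PySem.Int.mod cipher_len 2 == 1 then
        [PySem.List.pyGetD ciphers (PySem.Int.floordiv cipher_len 2) ""]
      else []
    output ++ cipher_mung (cipher_mung ciphers "REVERSE") "BOTTOM_HALF"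
  else if request == "MIDDLE_OUT" then
    let middle : Int := PySem.Int.floordiv cipher_len 2
    if PySem.Int.mod cipher_len 2 == 1 then
      (PySem.List.pyRange 1 (middle + 1) 1).foldl
        (fun out i => out ++ [PySem.List.pyGetD ciphers (middle + i) "",
                              PySem.List.pyGetD ciphers (middle - i) ""])
        [PySem.List.pyGetD ciphers middle ""]
    else
      (PySem.List.pyRange 1 (middle + 1) 1).foldl
        (fun out i => out ++ [PySem.List.pyGetD ciphers (middle - 1 + i) "",
                              PySem.List.pyGetD ciphers (middle - i) ""])
        []
  else []
termination_by ((if request == "TOP_HALF" then 1 else 0 : Nat))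
decreasing_by
  · simp_all
  · simp_all

-- ===== PORT B =====
-- B: no recursion — every branch is computed directly from slices; MIDDLE_OUT interleaves the
-- right half with the reversed left half via zip.
def cipher_mung_alt (ciphers : List String) (request : String) : List String :=
  let n : Int := (ciphers.length : Int)
  let h : Int := PySem.Int.floordiv n 2
  if request == "REVERSE" then
    ciphers.reverse
  else if request == "BOTTOM_HALF" then
    PySem.List.slice ciphers (some (h + PySem.Int.mod n 2)) none
  else if request == "TOP_HALF" then
    let mid : List String :=
      if PySem.Int.mod n 2 != 0 then [PySem.List.pyGetD ciphers h ""] else []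
    mid ++ (PySem.List.slice ciphers none (some h)).reverse
  else if request == "MIDDLE_OUT" then
    let mid : List String :=
      if PySem.Int.mod n 2 != 0 then [PySem.List.pyGetD ciphers h ""] else []
    ((PySem.List.slice ciphers (some (h + PySem.Int.mod n 2)) none).zip
        (PySem.List.slice ciphers none (some h)).reverse).foldl
      (fun out q => out ++ [q.1, q.2]) mid
  else []

-- ===== PRECONDITION & SPEC =====
def Spec_cipher_mung (ciphers : List String) (request : String) (out : List String) : Prop := out = cipher_mung_alt ciphers request
instance (ciphers : List String) (request : String) (out : List String) : Decidable (Spec_cipher_mung ciphers request out) := by unfold Spec_cipher_mung; infer_instance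

-- ===== CLAIM (what is proved, stated in full; the proofs are below) =====
def Claim_equal_cipher_mung : Prop := ∀ (ciphers : List String) (request : String), Dom_cipher_mung ciphers request → Spec_cipher_mung ciphers request (cipher_mung ciphers request)

-- ===== LEMMAS AND PROOFS =====

-- evaluation of A's non-recursive branches at literal requests
theorem mung_reverse (c : List String) : cipher_mung c "REVERSE" = c.reverse := by
  rw [cipher_mung]; simp

theorem mung_bottom (c : List String) : cipher_mung c "BOTTOM_HALF" =
    (if PySem.Int.mod ((c.length : Int)) 2 == 1 then
      PySem.List.slice c (some (PySem.Int.floordiv ((c.length : Int)) 2 + 1)) none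
    else
      PySem.List.slice c (some (PySem.Int.floordiv ((c.length : Int)) 2)) none) := by
  rw [cipher_mung]; simp

-- a for-loop over range(1, k+1) as a flatMap over List.range k
theorem flatMap_pyRange_one {F : Int → List String} (k : Nat) :
    (PySem.List.pyRange 1 ((k : Int) + 1) 1).flatMap F
      = (List.range k).flatMap (fun j => F (((j + 1 : Nat) : Int))) := by
  induction k with
  | zero => simp [PySem.List.pyRange]
  | succ n ih =>
      rw [show ((n + 1 : Nat) : Int) + 1 = ((n : Int) + 1) + 1 by push_cast; ring,
        PySem.List.pyRange_one_succ_right (by omega), List.flatMap_append, ih,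
        List.range_succ, List.flatMap_append]
      simp

-- interleaving a zip, as a flatMap over indices
theorem zip_flatMap_pair {a : Type} (d : a) (R L : List a) (hlen : R.length = L.length) :
    (R.zip L).flatMap (fun q => [q.1, q.2])
      = (List.range R.length).flatMap (fun j => [R.getD j d, L.getD j d]) := by
  induction R generalizing L with
  | nil => simp
  | cons x R ih =>
      cases L with
      | nil => simp at hlen
      | cons y L =>
          simp only [List.length_cons, List.range_succ_eq_map, List.zip_cons_cons,
            List.flatMap_cons, List.flatMap_map]
          simp only [List.length_cons, Nat.add_right_cancel_iff] at hlen
          rw [ih L hlen]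
          simp

-- B's MIDDLE_OUT zip loop as a flatMap over indices of the original list
theorem middle_flat (c : List String) (h p : Nat) (hp : p ≤ 1) (hlen : c.length = 2*h+p) :
    (List.range h).flatMap (fun j => [c.getD (h+p+j) "", c.getD (h-1-j) ""])
      = ((c.drop (h+p)).zip (c.take h).reverse).flatMap (fun q => [q.1, q.2]) := by
  have hR : (c.drop (h+p)).length = h := by simp only [List.length_drop, hlen]; omega
  have hL : ((c.take h).reverse).length = h := by
    simp only [List.length_reverse, List.length_take, hlen]; omega
  rw [zip_flatMap_pair "" _ _ (by rw [hR, hL]), hR]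
  refine List.flatMap_congr ?_
  intro j hj
  rw [List.mem_range] at hj
  have h1 : (c.drop (h+p)).getD j "" = c.getD (h+p+j) "" := by
    simp [List.getD_eq_getElem?_getD, List.getElem?_drop]
  have h2 : (c.take h).reverse.getD j "" = c.getD (h-1-j) "" := by
    have hh : h ≤ c.length := by omega
    have hlt : j < (c.take h).length := by
      simp only [List.length_take]; omega
    rw [List.getD_eq_getElem?_getD, List.getD_eq_getElem?_getD,
      List.getElem?_reverse hlt]
    have hidx : (c.take h).length - 1 - j = h - 1 - j := by
      simp only [List.length_take]; omega
    rw [hidx, List.getElem?_take, if_pos (by omega)]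
  rw [h1, h2]

-- A's MIDDLE_OUT loop body (odd length) over indices of the original list
theorem AtoRange_odd (c : List String) (h : Nat) :
    (PySem.List.pyRange 1 ((h:Int)+1) 1).flatMap
        (fun i => [PySem.List.pyGetD c ((h:Int) + i) "", PySem.List.pyGetD c ((h:Int) - i) ""])
      = (List.range h).flatMap (fun j => [c.getD (h+1+j) "", c.getD (h-1-j) ""]) := by
  rw [flatMap_pyRange_one]
  refine List.flatMap_congr ?_
  intro j hj
  rw [List.mem_range] at hj
  have e1 : (h:Int) + ((j+1 : Nat):Int) = ((h+1+j : Nat) : Int) := by push_cast; ring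
  have e2 : (h:Int) - ((j+1 : Nat):Int) = ((h-1-j : Nat) : Int) := by omega
  rw [e1, e2, PySem.List.pyGetD_natCast, PySem.List.pyGetD_natCast]

-- A's MIDDLE_OUT loop body (even length) over indices of the original list
theorem AtoRange_even (c : List String) (h : Nat) :
    (PySem.List.pyRange 1 ((h:Int)+1) 1).flatMap
        (fun i => [PySem.List.pyGetD c ((h:Int) - 1 + i) "", PySem.List.pyGetD c ((h:Int) - i) ""])
      = (List.range h).flatMap (fun j => [c.getD (h+0+j) "", c.getD (h-1-j) ""]) := by
  rw [flatMap_pyRange_one]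
  refine List.flatMap_congr ?_
  intro j hj
  rw [List.mem_range] at hj
  have e1 : (h:Int) - 1 + ((j+1 : Nat):Int) = ((h+0+j : Nat) : Int) := by push_cast; omega
  have e2 : (h:Int) - ((j+1 : Nat):Int) = ((h-1-j : Nat) : Int) := by omega
  rw [e1, e2, PySem.List.pyGetD_natCast, PySem.List.pyGetD_natCast]

-- ===== VERDICT (by name: the statement is the Claim_ definition above) =====
theorem cipher_mung_spec : Claim_equal_cipher_mung := by
  intro c r _
  unfold Spec_cipher_mung
  obtain ⟨h, p, hp, hlen⟩ : ∃ h p, p ≤ 1 ∧ c.length = 2*h + p :=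
    ⟨c.length/2, c.length%2, by omega, by omega⟩
  have hfd : PySem.Int.floordiv ((c.length : Int)) 2 = (h : Int) := by
    rw [PySem.Int.floordiv_eq_ediv_of_pos (by norm_num)]; omega
  have hmod : PySem.Int.mod ((c.length : Int)) 2 = (p : Int) := by
    rw [PySem.Int.mod_eq_emod_of_pos (by norm_num)]; omega
  rw [cipher_mung]
  unfold cipher_mung_alt
  simp only [mung_reverse, mung_bottom, List.length_reverse, hfd, hmod]
  rcases Nat.le_one_iff_eq_zero_or_eq_one.mp hp with rfl | rfl
  · -- even length
    simp only [Nat.cast_zero, add_zero, show (((0:Int)) == 1) = false from rfl,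
      show (((0:Int)) != 0) = false from rfl, Bool.false_eq_true, if_false]
    split_ifs <;> try rfl
    · -- TOP_HALF
      simp only [List.nil_append]
      rw [PySem.List.slice_from_natCast, PySem.List.slice_to_natCast, List.drop_reverse,
        show c.length - h = h by omega]
    · -- MIDDLE_OUT
      rw [PySem.List.foldl_append_eq_flatMap, PySem.List.foldl_append_eq_flatMap,
        PySem.List.slice_from_natCast, PySem.List.slice_to_natCast,
        AtoRange_even, middle_flat c h 0 (by omega) (by omega)]
      simp
  · -- odd length
    simp only [Nat.cast_one, show (((1:Int)) == 1) = true from rfl,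
      show (((1:Int)) != 0) = true from rfl, if_true]
    split_ifs <;> try rfl
    · -- TOP_HALF
      congr 1
      rw [show ((h:Int)+1) = ((h+1:Nat):Int) by push_cast; ring,
        PySem.List.slice_from_natCast, PySem.List.slice_to_natCast, List.drop_reverse,
        show c.length - (h+1) = h by omega]
    · -- MIDDLE_OUT
      rw [PySem.List.foldl_append_eq_flatMap, PySem.List.foldl_append_eq_flatMap]
      congr 1
      rw [show ((h:Int)+1) = ((h+1:Nat):Int) by push_cast; ring,
        PySem.List.slice_from_natCast, PySem.List.slice_to_natCast,
        show ((h+1:Nat):Int) = ((h:Int)+1) by push_cast; ring,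
        AtoRange_odd, middle_flat c h 1 (by omega) (by omega)]
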